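-- pv_equiv track=rewrite | github.com/Hablutzel/smartp | v1.py | get_ideal_v1
-- ===== SOURCE A (Python) =====
-- FS = [3,1,0,6] # CANTIDAD DE SPOTS LIBRES POR ZONA
--
-- def is_available(zona):
--     if FS[zona] > 0:
--         return True
--     else:
--         return False
--
-- def get_ideal_v1(zonas, skip=[]):
--     z = -1
--     indexs = sorted(range(len(zonas)),key=zonas.__getitem__)
--     for i in indexs:
--         if i not in skip:
--             if is_available(i):
--                 z = i
--                 break
--     return z
-- ===== SOURCE B (Python) =====
-- FS = [3,1,0,6] # CANTIDAD DE SPOTS LIBRES POR ZONA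
--
-- def is_available(zona):
--     if FS[zona] > 0:
--         return True
--     else:
--         return False
--
-- def get_ideal_v1(zonas, skip=[]):
--     blocked = set(skip)
--     best = None  # (value, index) of the best zone so far
--     for i in range(min(len(zonas), len(FS))):
--         if i not in blocked and is_available(i):
--             v = zonas[i]
--             if best is None or v < best[0]:
--                 best = (v, i)
--     return best[1] if best is not None else -1
-- ===== Notes on version B (the rewrite author's own statement) =====
-- stated objective: alternative
-- what changed: B replaces A's sort-all-indices-then-scan-with-break by a single min-tracking pass over the zones that exist in FS (skip held in a set); Pre_ excludes exactly the inputs on which A raises IndexError (a non-skipped index >= len(FS) reached before any available zone).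
import Mathlib
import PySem

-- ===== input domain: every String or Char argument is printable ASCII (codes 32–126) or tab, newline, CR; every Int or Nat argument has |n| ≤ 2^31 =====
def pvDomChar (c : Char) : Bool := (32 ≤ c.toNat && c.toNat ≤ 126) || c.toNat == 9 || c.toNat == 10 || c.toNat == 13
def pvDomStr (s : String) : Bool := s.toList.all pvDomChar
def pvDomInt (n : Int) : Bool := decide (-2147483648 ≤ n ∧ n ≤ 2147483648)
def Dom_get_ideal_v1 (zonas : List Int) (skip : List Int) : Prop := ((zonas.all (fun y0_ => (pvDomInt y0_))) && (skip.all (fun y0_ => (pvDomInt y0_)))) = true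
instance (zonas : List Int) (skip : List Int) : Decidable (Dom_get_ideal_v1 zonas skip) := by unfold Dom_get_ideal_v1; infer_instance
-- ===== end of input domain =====

-- B replaces A's sort-all-indices-then-scan by one min-tracking pass over the zones
-- that exist in FS, with skip held in a set (equivalence is about the return value).

-- ===== PORT A =====
def pvFS : List Int := [3, 1, 0, 6]   -- FS = [3,1,0,6]

-- is_available(zona); FS[zona] raises IndexError for zona ∉ [-4,3]: modeled as
-- unavailable (getD 0); such a call happens only outside Pre_get_ideal_v1.
def pvIsAvailable (zona : Int) : Bool := decide (0 < (PySem.List.pyGet? pvFS zona).getD 0)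

-- zonas.__getitem__ as sort key; indices fed to it are in range(len(zonas)), so getD is exact there
def pvKeyA (zonas : List Int) (i : Int) : Int := (PySem.List.pyGet? zonas i).getD 0

-- the 'for i in indexs: …' loop with its break; z stays -1 when no break fires
def pvLoopA (skip : List Int) : List Int → Int
  | [] => -1
  | i :: rest => if i ∈ skip then pvLoopA skip rest
                 else if pvIsAvailable i then i else pvLoopA skip rest

def get_ideal_v1 (zonas : List Int) (skip : List Int) : Int :=
  pvLoopA skip (PySem.List.sorted (PySem.List.pyRange 0 zonas.length) (pvKeyA zonas))

-- ===== PORT B =====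
-- one step of B's loop: keep the best (value, index) seen so far
def pvStepB (zonas : List Int) (s : PySem.Set Int) (st : Option (Int × Int)) (i : Int) : Option (Int × Int) :=
  if i ∉ s ∧ pvIsAvailable i = true then
    let v := (PySem.List.pyGet? zonas i).getD 0
    match st with
    | none => some (v, i)
    | some b => if v < b.1 then some (v, i) else some b
  else st

def get_ideal_v1_alt (zonas : List Int) (skip : List Int) : Int :=
  match (PySem.List.pyRange 0 (min (zonas.length : Int) (pvFS.length : Int))).foldl
      (pvStepB zonas (PySem.Set.ofList skip)) none with
  | none => -1
  | some b => b.2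

-- ===== PRECONDITION & SPEC =====
-- Pre_ excludes exactly the inputs on which Python A raises IndexError (FS[i] with i ≥ 4):
-- A reaches such an i iff some non-skipped index ≥ 4 sorts strictly before every
-- non-skipped index in {0,1,3}; Pre_ says every non-skipped i ≥ 4 is weakly beaten by one of them.
def Pre_get_ideal_v1 (zonas : List Int) (skip : List Int) : Prop :=
  ∀ i : Nat, i < zonas.length → 4 ≤ i → ((i : Int) ∈ skip ∨
    ∃ j ∈ ([0, 1, 3] : List Nat), j < zonas.length ∧ (j : Int) ∉ skip ∧
      zonas.getD j 0 ≤ zonas.getD i 0)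
instance (zonas : List Int) (skip : List Int) : Decidable (Pre_get_ideal_v1 zonas skip) := by
  unfold Pre_get_ideal_v1; infer_instance

def pvWitness_get_ideal_v1 : List Int × List Int := ([0, 1, 2, 3, 4], [])

def Spec_get_ideal_v1 (zonas : List Int) (skip : List Int) (out : Int) : Prop := out = get_ideal_v1_alt zonas skip
instance (zonas : List Int) (skip : List Int) (out : Int) : Decidable (Spec_get_ideal_v1 zonas skip out) := by unfold Spec_get_ideal_v1; infer_instance

-- ===== CLAIM (what is proved, stated in full; the proofs are below) =====
def Claim_equal_get_ideal_v1 : Prop := ∀ (zonas : List Int) (skip : List Int), Dom_get_ideal_v1 zonas skip → Pre_get_ideal_v1 zonas skip → Spec_get_ideal_v1 zonas skip (get_ideal_v1 zonas skip)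

-- ===== LEMMAS AND PROOFS =====

-- lexicographic (value, index) order — the order A's stable sort arranges distinct indices in
def pvLexLt (zonas : List Int) (a b : Int) : Prop :=
  pvKeyA zonas a < pvKeyA zonas b ∨ (pvKeyA zonas a = pvKeyA zonas b ∧ a < b)

def pvLexLe (zonas : List Int) (a b : Int) : Prop := pvLexLt zonas a b ∨ a = b

-- the candidate predicate both programs select on
def pvCandB (skip : List Int) (i : Int) : Prop := i ∉ skip ∧ pvIsAvailable i = true

def pvInvB (zonas skip : List Int) (done : List Int) (st : Option (Int × Int)) : Prop :=
  (st = none ∧ ∀ a ∈ done, ¬ pvCandB skip a) ∨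
  (∃ v i, st = some (v, i) ∧ pvCandB skip i ∧ i ∈ done ∧ v = pvKeyA zonas i ∧
    ∀ j ∈ done, pvCandB skip j → pvLexLe zonas i j)

theorem pv_insertBy_pairwise (zonas : List Int) (x : Int) (acc : List Int)
    (hpw : acc.Pairwise (pvLexLt zonas)) (hlt : ∀ a ∈ acc, a < x) :
    (PySem.List.insertBy (fun a b => decide (pvKeyA zonas a < pvKeyA zonas b)) x acc).Pairwise (pvLexLt zonas) := by
  induction acc with
  | nil => simp [PySem.List.insertBy]
  | cons y ys ih =>
    rw [List.pairwise_cons] at hpw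
    obtain ⟨hy, hys⟩ := hpw
    unfold PySem.List.insertBy
    by_cases h : pvKeyA zonas x < pvKeyA zonas y
    · simp only [h, decide_true, if_true]
      refine List.pairwise_cons.2 ⟨?_, List.pairwise_cons.2 ⟨hy, hys⟩⟩
      intro z hz
      rcases List.mem_cons.1 hz with rfl | hz
      · exact Or.inl h
      · have := hy z hz
        rcases this with h2 | ⟨h2, _⟩
        · exact Or.inl (lt_trans h h2)
        · exact Or.inl (h2 ▸ h)
    · simp only [h, decide_false]
      refine List.pairwise_cons.2 ⟨?_, ih hys (fun a ha => hlt a (List.mem_cons_of_mem _ ha))⟩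
      intro z hz
      rw [PySem.List.mem_insertBy] at hz
      rcases hz with hz | hz
      · rw [hz]
        have hyx : y < x := hlt y (List.mem_cons_self ..)
        rcases lt_or_ge (pvKeyA zonas y) (pvKeyA zonas x) with h2 | h2
        · exact Or.inl h2
        · exact Or.inr ⟨le_antisymm (not_lt.1 h) h2, hyx⟩
      · exact hy z hz

theorem pv_foldl_insertBy_pairwise (zonas : List Int) (xs acc : List Int)
    (hxs : xs.Pairwise (· < ·)) (hacc : acc.Pairwise (pvLexLt zonas))
    (hcross : ∀ a ∈ acc, ∀ x ∈ xs, a < x) :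
    (xs.foldl (fun acc x => PySem.List.insertBy (fun a b => decide (pvKeyA zonas a < pvKeyA zonas b)) x acc) acc).Pairwise (pvLexLt zonas) := by
  induction xs generalizing acc with
  | nil => exact hacc
  | cons x xs ih =>
    rw [List.pairwise_cons] at hxs
    obtain ⟨hx, hxs⟩ := hxs
    refine ih _ hxs (pv_insertBy_pairwise zonas x acc hacc (fun a ha => hcross a ha x (List.mem_cons_self ..))) ?_
    intro a ha y hy
    rw [PySem.List.mem_insertBy] at ha
    rcases ha with rfl | ha
    · exact hx y hy
    · exact hcross a ha y (List.mem_cons_of_mem _ hy)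

theorem pv_sorted_pairwise_lex (zonas : List Int) (xs : List Int) (h : xs.Pairwise (· < ·)) :
    (PySem.List.sorted xs (pvKeyA zonas)).Pairwise (pvLexLt zonas) := by
  rw [PySem.List.sorted_eq_foldl_insertBy]
  exact pv_foldl_insertBy_pairwise zonas xs [] h List.Pairwise.nil (by simp)

theorem pv_avail_char (i : Int) (h : 0 ≤ i) :
    pvIsAvailable i = true ↔ (i = 0 ∨ i = 1 ∨ i = 3) := by
  rcases lt_or_ge i 4 with h4 | h4
  · interval_cases i <;> decide
  · have hg : PySem.List.pyGet? pvFS i = none := by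
      have h0 : (0:Int) ≤ i := by omega
      simp [pvFS, PySem.List.pyGet?, PySem.List.pyIdx?, h0]
      omega
    unfold pvIsAvailable
    rw [hg]; simp; omega

theorem pv_loopA_spec (zonas skip : List Int) (l : List Int) (hpw : l.Pairwise (pvLexLt zonas)) :
    (pvLoopA skip l = -1 ∧ ∀ i ∈ l, ¬ pvCandB skip i) ∨
    (pvCandB skip (pvLoopA skip l) ∧ pvLoopA skip l ∈ l ∧
      ∀ j ∈ l, pvCandB skip j → pvLexLe zonas (pvLoopA skip l) j) := by
  induction l with
  | nil => left; simp [pvLoopA]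
  | cons i rest ih =>
    rw [List.pairwise_cons] at hpw
    obtain ⟨hi, hrest⟩ := hpw
    by_cases hsk : i ∈ skip
    · have he : pvLoopA skip (i :: rest) = pvLoopA skip rest := by simp [pvLoopA, hsk]
      rcases ih hrest with ⟨h1, h2⟩ | ⟨h1, h2, h3⟩
      · left; rw [he]; exact ⟨h1, by
          intro j hj
          rcases List.mem_cons.1 hj with rfl | hj
          · intro ⟨c, _⟩; exact c hsk
          · exact h2 j hj⟩
      · right; rw [he]
        refine ⟨h1, List.mem_cons_of_mem _ h2, ?_⟩
        intro j hj hq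
        rcases List.mem_cons.1 hj with rfl | hj
        · exact absurd hsk hq.1
        · exact h3 j hj hq
    · by_cases hav : pvIsAvailable i = true
      · have he : pvLoopA skip (i :: rest) = i := by simp [pvLoopA, hsk, hav]
        right; rw [he]
        refine ⟨⟨hsk, hav⟩, List.mem_cons_self .., ?_⟩
        intro j hj hq
        rcases List.mem_cons.1 hj with rfl | hj
        · exact Or.inr rfl
        · exact Or.inl (hi j hj)
      · have he : pvLoopA skip (i :: rest) = pvLoopA skip rest := by simp [pvLoopA, hsk, hav]
        rcases ih hrest with ⟨h1, h2⟩ | ⟨h1, h2, h3⟩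
        · left; rw [he]; exact ⟨h1, by
            intro j hj
            rcases List.mem_cons.1 hj with rfl | hj
            · intro ⟨_, c⟩; exact hav c
            · exact h2 j hj⟩
        · right; rw [he]
          refine ⟨h1, List.mem_cons_of_mem _ h2, ?_⟩
          intro j hj hq
          rcases List.mem_cons.1 hj with rfl | hj
          · exact absurd hq.2 hav
          · exact h3 j hj hq

theorem pv_stepB_inv (zonas skip : List Int) (done : List Int) (st : Option (Int × Int)) (i : Int)
    (hgt : ∀ a ∈ done, a < i) (h : pvInvB zonas skip done st) :
    pvInvB zonas skip (done ++ [i]) (pvStepB zonas (PySem.Set.ofList skip) st i) := by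
  have hc : (i ∉ PySem.Set.ofList skip ∧ pvIsAvailable i = true) ↔ pvCandB skip i := by
    unfold pvCandB
    rw [PySem.Set.mem_ofList]
  by_cases hcand : pvCandB skip i
  · rw [pvStepB, if_pos (hc.2 hcand)]
    rcases h with ⟨hst, h2⟩ | ⟨v, b, hst, hb1, hb2, hb3, hb4⟩
    · subst hst
      right
      refine ⟨_, i, rfl, hcand, by simp, rfl, ?_⟩
      intro j hj hcj
      rcases List.mem_append.1 hj with hj | hj
      · exact absurd hcj (h2 j hj)
      · simp at hj; exact Or.inr hj.symm
    · subst hst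
      by_cases hlt : (PySem.List.pyGet? zonas i).getD 0 < v
      · simp only [hlt, if_true]
        right
        refine ⟨_, i, rfl, hcand, by simp, rfl, ?_⟩
        intro j hj hcj
        rcases List.mem_append.1 hj with hj | hj
        · rcases hb4 j hj hcj with hle | rfl
          · left; rw [hb3] at hlt
            rcases hle with hk | ⟨hk, _⟩
            · exact Or.inl (lt_trans hlt hk)
            · exact Or.inl (hk ▸ hlt)
          · left; exact Or.inl (hb3 ▸ hlt)
        · simp at hj; exact Or.inr hj.symm
      · simp only [hlt, if_false]
        right
        refine ⟨v, b, rfl, hb1, List.mem_append_left _ hb2, hb3, ?_⟩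
        intro j hj hcj
        rcases List.mem_append.1 hj with hj | hj
        · exact hb4 j hj hcj
        · simp at hj; subst hj
          left
          have hkk : (PySem.List.pyGet? zonas j).getD 0 = pvKeyA zonas j := rfl
          rcases lt_or_ge v ((PySem.List.pyGet? zonas j).getD 0) with hk | hk
          · exact Or.inl (by omega)
          · exact Or.inr ⟨by omega, hgt _ hb2⟩
  · rw [pvStepB, if_neg (fun hcc => hcand (hc.1 hcc))]
    rcases h with ⟨hst, h2⟩ | ⟨v, b, hst, hb1, hb2, hb3, hb4⟩
    · subst hst
      left
      refine ⟨rfl, ?_⟩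
      intro a ha
      rcases List.mem_append.1 ha with ha | ha
      · exact h2 a ha
      · simp at ha; subst ha; exact hcand
    · subst hst
      right
      refine ⟨v, b, rfl, hb1, List.mem_append_left _ hb2, hb3, ?_⟩
      intro j hj hcj
      rcases List.mem_append.1 hj with hj | hj
      · exact hb4 j hj hcj
      · simp at hj; subst hj; exact absurd hcj hcand

theorem pv_foldB_inv (zonas skip : List Int) (l done : List Int) (st : Option (Int × Int))
    (hl : l.Pairwise (· < ·)) (hcross : ∀ a ∈ done, ∀ x ∈ l, a < x)
    (hinv : pvInvB zonas skip done st) :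
    pvInvB zonas skip (done ++ l) (l.foldl (pvStepB zonas (PySem.Set.ofList skip)) st) := by
  induction l generalizing done st with
  | nil => simpa using hinv
  | cons x xs ih =>
    rw [List.pairwise_cons] at hl
    obtain ⟨hx, hxs⟩ := hl
    have h1 := pv_stepB_inv zonas skip done st x (fun a ha => hcross a ha x (List.mem_cons_self ..)) hinv
    have h2 := ih (done ++ [x]) _ hxs (by
      intro a ha y hy
      rcases List.mem_append.1 ha with ha | ha
      · exact hcross a ha y (List.mem_cons_of_mem _ hy)
      · simp at ha; subst ha; exact hx y hy) h1
    simpa [List.append_assoc] using h2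

theorem pv_B_char (zonas skip : List Int) :
    pvInvB zonas skip (PySem.List.pyRange 0 (min (zonas.length : Int) (pvFS.length : Int)))
      ((PySem.List.pyRange 0 (min (zonas.length : Int) (pvFS.length : Int))).foldl
        (pvStepB zonas (PySem.Set.ofList skip)) none) := by
  have h := pv_foldB_inv zonas skip
      (PySem.List.pyRange 0 (min (zonas.length : Int) (pvFS.length : Int))) [] none
      (PySem.List.pairwise_lt_pyRange_one 0 _) (by simp) (Or.inl ⟨rfl, by simp⟩)
  simpa using h

theorem pv_final (zonas skip : List Int) (_hpre : Pre_get_ideal_v1 zonas skip) :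
    get_ideal_v1 zonas skip = get_ideal_v1_alt zonas skip := by
  have hpw := pv_sorted_pairwise_lex zonas (PySem.List.pyRange 0 zonas.length)
      (PySem.List.pairwise_lt_pyRange_one 0 zonas.length)
  have hmemA : ∀ i : Int, i ∈ PySem.List.sorted (PySem.List.pyRange 0 zonas.length) (pvKeyA zonas) ↔ 0 ≤ i ∧ i < (zonas.length : Int) := by
    intro i
    rw [PySem.List.mem_sorted, PySem.List.mem_pyRange_one]
  have hmemB : ∀ i : Int, i ∈ PySem.List.pyRange 0 (min (zonas.length : Int) (pvFS.length : Int)) ↔ 0 ≤ i ∧ i < min (zonas.length : Int) 4 := by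
    intro i
    rw [PySem.List.mem_pyRange_one]
    simp [pvFS]
  -- any candidate index of either side lies in both index lists
  have hAB : ∀ i : Int, pvCandB skip i → 0 ≤ i → i < (zonas.length : Int) →
      i ∈ PySem.List.pyRange 0 (min (zonas.length : Int) (pvFS.length : Int)) := by
    intro i hcand h0 hlen
    have h3 := (pv_avail_char i h0).1 hcand.2
    refine (hmemB i).2 ⟨h0, ?_⟩
    rcases h3 with rfl | rfl | rfl <;> omega
  unfold get_ideal_v1 get_ideal_v1_alt
  rcases pv_loopA_spec zonas skip _ hpw with ⟨hA1, hA2⟩ | ⟨hAq, hAmem, hAmin⟩ <;>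
    rcases pv_B_char zonas skip with ⟨hB1, hB2⟩ | ⟨v, b, hB1, hBc, hBmem, hBkey, hBmin⟩
  · rw [hA1, hB1]
  · exfalso
    have hb := (hmemB b).1 hBmem
    exact hA2 b ((hmemA b).2 ⟨hb.1, by omega⟩) hBc
  · exfalso
    set m := pvLoopA skip (PySem.List.sorted (PySem.List.pyRange 0 zonas.length) (pvKeyA zonas)) with hm
    have hr := (hmemA m).1 hAmem
    exact hB2 m (hAB m hAq hr.1 hr.2) hAq
  · rw [hB1]
    set m := pvLoopA skip (PySem.List.sorted (PySem.List.pyRange 0 zonas.length) (pvKeyA zonas)) with hm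
    have hrA := (hmemA m).1 hAmem
    have hrB := (hmemB b).1 hBmem
    have h1 : pvLexLe zonas m b := hAmin b ((hmemA b).2 ⟨hrB.1, by omega⟩) hBc
    have h2 : pvLexLe zonas b m := hBmin m (hAB m hAq hrA.1 hrA.2) hAq
    show m = b
    rcases h1 with h1 | h1
    · rcases h2 with h2 | h2
      · unfold pvLexLt at h1 h2; omega
      · exact h2.symm
    · exact h1

-- ===== VERDICT (by name: the statement is the Claim_ definition above) =====
theorem get_ideal_v1_spec : Claim_equal_get_ideal_v1 := by
  intro zonas skip _ hpre
  exact pv_final zonas skip hpre
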